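-- pv_equiv track=rewrite | github.com/jtreeves/advent_of_code_2022_solutions | day10/solution.py | find_main_register_cycle_pairs
-- ===== SOURCE A (Python) =====
-- def find_main_register_cycle_pairs(statuses):
--     key_cycles = [20, 60, 100, 140, 180, 220]
--     pairs = []
--     for cycle in key_cycles:
--         register = find_register_at_cycle_from_statuses(statuses, cycle)
--         pairs.append({
--             "cycles": cycle,
--             "register": register
--         })
--     return pairs
--
-- def find_register_at_cycle_from_statuses(statuses, cycle_number):
--     register_before = None
--     register_at = None
--     for status in statuses:
--         if status["cycles"] == cycle_number - 1:
--             register_before = status["register"]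
--         if status["cycles"] == cycle_number:
--             register_at = status["register"]
--     if register_at != None:
--         return register_at
--     else:
--         return register_before
-- ===== SOURCE B (Python) =====
-- def find_main_register_cycle_pairs(statuses):
--     key_cycles = [20, 60, 100, 140, 180, 220]
--     relevant = set()
--     for cycle in key_cycles:
--         relevant.add(cycle - 1)
--         relevant.add(cycle)
--     index = {}
--     for status in statuses:
--         cycles = status["cycles"]
--         if cycles in relevant:
--             index[cycles] = status["register"]
--     pairs = []
--     for cycle in key_cycles:
--         if cycle in index:
--             register = index[cycle]
--         else:
--             register = index.get(cycle - 1)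
--         pairs.append({
--             "cycles": cycle,
--             "register": register
--         })
--     return pairs
-- ===== Notes on version B (the rewrite author's own statement) =====
-- stated objective: faster
-- what changed: B builds a dictionary index of the relevant cycle->register values in one pass over statuses and answers each of the six key cycles by O(1) lookup (exact cycle, else cycle-1), instead of A's six full scans of the status list.
import Mathlib
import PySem

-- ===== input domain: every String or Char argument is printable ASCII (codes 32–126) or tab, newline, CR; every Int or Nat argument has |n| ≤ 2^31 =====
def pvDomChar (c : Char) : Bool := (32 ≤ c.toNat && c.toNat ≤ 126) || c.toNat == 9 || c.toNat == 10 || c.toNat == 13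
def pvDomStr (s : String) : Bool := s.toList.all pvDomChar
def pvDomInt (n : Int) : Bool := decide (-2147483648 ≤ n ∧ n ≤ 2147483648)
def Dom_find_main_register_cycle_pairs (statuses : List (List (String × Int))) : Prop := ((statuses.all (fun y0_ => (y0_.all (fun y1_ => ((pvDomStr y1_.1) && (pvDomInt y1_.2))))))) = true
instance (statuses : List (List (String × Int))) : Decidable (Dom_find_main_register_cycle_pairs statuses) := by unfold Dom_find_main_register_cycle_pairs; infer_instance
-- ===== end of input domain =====

-- B replaces A's six full scans of the status list with one indexing pass plus O(1)
-- dictionary lookups (objective: faster by a constant factor / single pass).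

-- status["k"] on the assoc-list model of a Python dict: first-match lookup
def pvKeyGet (status : List (String × Int)) (k : String) : Option Int :=
  (PySem.Dict.mk status).get? k

-- ===== PORT A =====
def pvFindRegisterAtCycle (statuses : List (List (String × Int))) (cycleNumber : Int) : Option Int :=
  let r := statuses.foldl
    (fun (p : Option Int × Option Int) status =>
      let rb := if pvKeyGet status "cycles" = some (cycleNumber - 1) then pvKeyGet status "register" else p.1
      let ra := if pvKeyGet status "cycles" = some cycleNumber then pvKeyGet status "register" else p.2
      (rb, ra))
    (none, none)
  if r.2 ≠ none then r.2 else r.1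

def find_main_register_cycle_pairs (statuses : List (List (String × Int))) : List (List (String × Option Int)) :=
  ([20, 60, 100, 140, 180, 220] : List Int).foldl
    (fun pairs cycle =>
      pairs ++ [[("cycles", some cycle), ("register", pvFindRegisterAtCycle statuses cycle)]])
    []

-- ===== PORT B =====
-- relevant = the set {c-1, c : c a key cycle}, built exactly as Source B builds it
def pvRelevant : PySem.Set Int :=
  ([20, 60, 100, 140, 180, 220] : List Int).foldl
    (fun s cycle => PySem.Set.add (PySem.Set.add s (cycle - 1)) cycle) []

def pvBuildIndex (statuses : List (List (String × Int))) : PySem.Dict Int Int :=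
  statuses.foldl
    (fun d status =>
      match pvKeyGet status "cycles" with
      | some cycles =>
          if cycles ∈ pvRelevant then
            match pvKeyGet status "register" with
            | some r => d.insert cycles r
            | none => d          -- unreachable under Pre_ (Python raises KeyError here)
          else d
      | none => d)               -- unreachable under Pre_ (Python raises KeyError here)
    PySem.Dict.empty

def find_main_register_cycle_pairs_alt (statuses : List (List (String × Int))) : List (List (String × Option Int)) :=
  let index := pvBuildIndex statuses
  ([20, 60, 100, 140, 180, 220] : List Int).foldl
    (fun pairs cycle =>
      let register := if index.contains cycle then index.get? cycle else index.get? (cycle - 1)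
      pairs ++ [[("cycles", some cycle), ("register", register)]])
    []

-- ===== PRECONDITION & SPEC =====
-- Pre_ excludes exactly the inputs on which the Python A raises KeyError: a status
-- without a "cycles" key, or a status whose cycles value is adjacent to a key cycle
-- (∈ pvRelevant) but which has no "register" key.
def Pre_find_main_register_cycle_pairs (statuses : List (List (String × Int))) : Prop :=
  ∀ status ∈ statuses,
    pvKeyGet status "cycles" ≠ none ∧
    ((pvKeyGet status "cycles").getD 0 ∈ pvRelevant → pvKeyGet status "register" ≠ none)
instance (statuses : List (List (String × Int))) : Decidable (Pre_find_main_register_cycle_pairs statuses) := by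
  unfold Pre_find_main_register_cycle_pairs; infer_instance

def pvWitness_find_main_register_cycle_pairs : (List (List (String × Int))) :=
  [[("cycles", 19), ("register", 7)], [("cycles", 21), ("register", 3)]]

def Spec_find_main_register_cycle_pairs (statuses : List (List (String × Int))) (out : List (List (String × Option Int))) : Prop := out = find_main_register_cycle_pairs_alt statuses
instance (statuses : List (List (String × Int))) (out : List (List (String × Option Int))) : Decidable (Spec_find_main_register_cycle_pairs statuses out) := by unfold Spec_find_main_register_cycle_pairs; infer_instance

-- ===== CLAIM (what is proved, stated in full; the proofs are below) =====
def Claim_equal_find_main_register_cycle_pairs : Prop := ∀ (statuses : List (List (String × Int))), Dom_find_main_register_cycle_pairs statuses → Pre_find_main_register_cycle_pairs statuses → Spec_find_main_register_cycle_pairs statuses (find_main_register_cycle_pairs statuses)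

-- ===== LEMMAS AND PROOFS =====

-- joint invariant of A's scan (for a fixed cycle c) and B's index-building fold
lemma pv_fold_inv (c : Int) (hc1 : (c - 1) ∈ pvRelevant) (hc2 : c ∈ pvRelevant) :
    ∀ (xs : List (List (String × Int))) (d : PySem.Dict Int Int) (p : Option Int × Option Int),
    (∀ status ∈ xs,
      pvKeyGet status "cycles" ≠ none ∧
      ((pvKeyGet status "cycles").getD 0 ∈ pvRelevant → pvKeyGet status "register" ≠ none)) →
    p.1 = d.get? (c - 1) → p.2 = d.get? c →
    (xs.foldl
      (fun (p : Option Int × Option Int) status =>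
        let rb := if pvKeyGet status "cycles" = some (c - 1) then pvKeyGet status "register" else p.1
        let ra := if pvKeyGet status "cycles" = some c then pvKeyGet status "register" else p.2
        (rb, ra)) p).1
      = (xs.foldl
          (fun d status =>
            match pvKeyGet status "cycles" with
            | some cycles =>
                if cycles ∈ pvRelevant then
                  match pvKeyGet status "register" with
                  | some r => d.insert cycles r
                  | none => d
                else d
            | none => d) d).get? (c - 1)
    ∧ (xs.foldl
      (fun (p : Option Int × Option Int) status =>
        let rb := if pvKeyGet status "cycles" = some (c - 1) then pvKeyGet status "register" else p.1
        let ra := if pvKeyGet status "cycles" = some c then pvKeyGet status "register" else p.2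
        (rb, ra)) p).2
      = (xs.foldl
          (fun d status =>
            match pvKeyGet status "cycles" with
            | some cycles =>
                if cycles ∈ pvRelevant then
                  match pvKeyGet status "register" with
                  | some r => d.insert cycles r
                  | none => d
                else d
            | none => d) d).get? c := by
  intro xs
  induction xs with
  | nil => intro d p hpre h1 h2; simpa [List.foldl] using ⟨h1, h2⟩
  | cons s xs ih =>
      intro d p hpre h1 h2
      obtain ⟨hck, hreg⟩ := hpre s (List.mem_cons_self ..)
      have hpre' : ∀ status ∈ xs, _ := fun status hs => hpre status (List.mem_cons_of_mem _ hs)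
      obtain ⟨cv, hcv⟩ : ∃ cv, pvKeyGet s "cycles" = some cv := by
        cases h : pvKeyGet s "cycles" with
        | none => exact absurd h hck
        | some cv => exact ⟨cv, rfl⟩
      simp only [List.foldl_cons, hcv]
      by_cases hrel : cv ∈ pvRelevant
      · obtain ⟨r, hr⟩ : ∃ r, pvKeyGet s "register" = some r := by
          have := hreg (by simp [hcv, hrel])
          cases h : pvKeyGet s "register" with
          | none => exact absurd h this
          | some r => exact ⟨r, rfl⟩
        simp only [if_pos hrel, hr]
        apply ih _ _ hpre'
        · by_cases hb : cv = c - 1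
          · subst hb
            simp [PySem.Dict.get?_insert_self]
          · rw [PySem.Dict.get?_insert_of_ne _ _ (fun h => hb h.symm)]
            simpa [Option.some.injEq, hb] using h1
        · by_cases hb : cv = c
          · subst hb
            simp [PySem.Dict.get?_insert_self]
          · rw [PySem.Dict.get?_insert_of_ne _ _ (fun h => hb h.symm)]
            simpa [Option.some.injEq, hb] using h2
      · simp only [if_neg hrel]
        apply ih _ _ hpre'
        · have hb : cv ≠ c - 1 := fun h => hrel (h ▸ hc1)
          simpa [Option.some.injEq, hb] using h1
        · have hb : cv ≠ c := fun h => hrel (h ▸ hc2)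
          simpa [Option.some.injEq, hb] using h2

-- per-cycle characterisation: A's scan equals B's index lookup
lemma pv_reg_eq (statuses : List (List (String × Int)))
    (hpre : Pre_find_main_register_cycle_pairs statuses)
    (c : Int) (hc1 : (c - 1) ∈ pvRelevant) (hc2 : c ∈ pvRelevant) :
    pvFindRegisterAtCycle statuses c =
      (if (pvBuildIndex statuses).contains c then (pvBuildIndex statuses).get? c
       else (pvBuildIndex statuses).get? (c - 1)) := by
  obtain ⟨h1, h2⟩ := pv_fold_inv c hc1 hc2 statuses PySem.Dict.empty (none, none) hpre
      (by simp [PySem.Dict.get?_empty]) (by simp [PySem.Dict.get?_empty])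
  unfold pvFindRegisterAtCycle pvBuildIndex
  simp only []
  rw [h1, h2, PySem.Dict.contains_eq_isSome_get?]
  cases h : (statuses.foldl
      (fun d status =>
        match pvKeyGet status "cycles" with
        | some cycles =>
            if cycles ∈ pvRelevant then
              match pvKeyGet status "register" with
              | some r => d.insert cycles r
              | none => d
            else d
        | none => d) PySem.Dict.empty).get? c <;> simp

-- ===== VERDICT (by name: the statement is the Claim_ definition above) =====
theorem find_main_register_cycle_pairs_spec : Claim_equal_find_main_register_cycle_pairs := by
  intro statuses hdom hpre
  unfold Spec_find_main_register_cycle_pairs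
  unfold find_main_register_cycle_pairs find_main_register_cycle_pairs_alt
  simp only [List.foldl_cons, List.foldl_nil, List.nil_append]
  rw [pv_reg_eq statuses hpre 20 (by decide) (by decide),
      pv_reg_eq statuses hpre 60 (by decide) (by decide),
      pv_reg_eq statuses hpre 100 (by decide) (by decide),
      pv_reg_eq statuses hpre 140 (by decide) (by decide),
      pv_reg_eq statuses hpre 180 (by decide) (by decide),
      pv_reg_eq statuses hpre 220 (by decide) (by decide)]
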